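-- pv_equiv track=rewrite | github.com/joshanashakya/dissertation | workspace/dataset/java-python/GeeksForGeeks/1128/A/2.py | rightmostNonZero
-- ===== SOURCE A (Python) =====
-- def rightmostNonZero(a, n):
--
--     # To store the count of times 5 can
--     # divide the array elements
--     c5 = 0
--
--     # Divide the array elements by 5
--     # as much as possible
--     for i in range(n):
--         while (a[i] > 0 and a[i] % 5 == 0):
--             a[i] //= 5
--
--             # increase count of 5
--             c5 += 1
--
--     # Divide the array elements by
--     # 2 as much as possible
--     for i in range(n):
--         while (c5 and a[i] > 0 and (a[i] & 1) == 0):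
--             a[i] >>= 1
--
--             # Decrease count of 5, because a '2' and
--             # a '5' makes a number with last digit '0'
--             c5 -= 1
--
--     ans = 1
--     for i in range(n):
--         ans = (ans * a[i] % 10) % 10
--
--     # If c5 is more than the multiplier
--     # should be taken as 5
--     if (c5):
--         ans = (ans * 5) % 10
--
--     if (ans):
--         return ans
--
--     return -1
-- ===== SOURCE B (Python) =====
-- def rightmostNonZero(a, n):
--     # Single counting pass (no mutation of a; A mutates its array in place --
--     # equivalence is about the return value only).
--     core = 1
--     t2 = 0
--     t5 = 0
--     for x in a[:max(0, n)]:
--         if x > 0: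
--             while x % 5 == 0:
--                 x //= 5
--                 t5 += 1
--             while x % 2 == 0:
--                 x //= 2
--                 t2 += 1
--         core = core * (x % 10) % 10
--     m = min(t2, t5)
--     ans = core * pow(2, t2 - m, 10) % 10
--     if t5 > m:
--         ans = ans * 5 % 10
--     return ans if ans else -1
-- ===== Notes on version B (the rewrite author's own statement) =====
-- stated objective: simpler
-- what changed: A makes three coupled index passes over the array, mutating it in place (strip 5s counting them, then strip 2s limited by that count, then a product pass); B makes one non-mutating pass that counts all factors of 2 and 5 per positive element and multiplies the stripped cores mod 10, then combines the leftover factors with a closed-form pow(2, t2-min, 10) and a single *5.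
import Mathlib
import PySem

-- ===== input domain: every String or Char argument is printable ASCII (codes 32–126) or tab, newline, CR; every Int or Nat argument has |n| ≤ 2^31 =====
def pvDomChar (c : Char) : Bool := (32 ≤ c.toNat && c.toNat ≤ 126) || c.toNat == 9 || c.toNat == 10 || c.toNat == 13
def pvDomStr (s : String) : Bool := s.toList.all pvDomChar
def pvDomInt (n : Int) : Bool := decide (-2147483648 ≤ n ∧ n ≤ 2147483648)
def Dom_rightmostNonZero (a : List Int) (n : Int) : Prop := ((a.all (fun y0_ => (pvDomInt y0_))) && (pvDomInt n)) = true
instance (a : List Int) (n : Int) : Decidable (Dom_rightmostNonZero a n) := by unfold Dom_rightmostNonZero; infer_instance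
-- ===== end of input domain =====

-- B replaces A's three index passes (which mutate the array) by one counting pass plus a
-- closed-form modular combine; equivalence is about the RETURN value only (A mutates `a` in place, B does not).


-- ===== PORT A =====

-- `while a[i] > 0 and a[i] % 5 == 0: a[i] //= 5; c5 += 1`, acting on the value read at a[i]
def pvStrip5 (x c5 : Int) : Int × Int :=
  if h : 0 < x ∧ PySem.Int.mod x 5 = 0 then
    pvStrip5 (PySem.Int.floordiv x 5) (c5 + 1)
  else (x, c5)
termination_by x.toNat
decreasing_by
  rw [PySem.Int.floordiv_eq_ediv_of_pos (by norm_num : (0:Int) < 5)]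
  omega

-- `while c5 and a[i] > 0 and (a[i] & 1) == 0: a[i] >>= 1; c5 -= 1`
def pvStrip2 (x c5 : Int) : Int × Int :=
  if h : c5 ≠ 0 ∧ 0 < x ∧ PySem.Int.band x 1 = 0 then
    pvStrip2 (x >>> (1:Nat)) (c5 - 1)
  else (x, c5)
termination_by x.toNat
decreasing_by
  have he : x >>> (1:Nat) = x / 2 := by simpa using @Int.shiftRight_eq_div_pow x 1
  rw [he]; omega

-- one iteration of A's in-place loops: read a[i], transform it with f threading the counter, write it back
def pvBody (f : Int → Int → Int × Int) (st : List Int × Int) (i : Int) : List Int × Int :=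
  let r := f (PySem.List.pyGetD st.1 i 0) st.2   -- a[i]; Pre_ keeps every i of range(n) in range
  (st.1.set i.toNat r.1, r.2)

def rightmostNonZero (a : List Int) (n : Int) : Int :=
  let p1 := (PySem.List.pyRange 0 n 1).foldl (pvBody pvStrip5) (a, 0)
  let p2 := (PySem.List.pyRange 0 n 1).foldl (pvBody pvStrip2) p1
  let ans := (PySem.List.pyRange 0 n 1).foldl
    (fun ans i => PySem.Int.mod (PySem.Int.mod (ans * PySem.List.pyGetD p2.1 i 0) 10) 10) 1
  let ans := if p2.2 ≠ 0 then PySem.Int.mod (ans * 5) 10 else ans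
  if ans ≠ 0 then ans else -1

-- ===== PORT B =====

-- `while x % d == 0: x //= d; t += 1` of Source B, for d = 5 and d = 2; the `0 < x` conjunct is a
-- totality guard only: B runs these loops under its `if x > 0` branch, where it is always true.
def pvDivOut5 (x t : Int) : Int × Int :=
  if h : 0 < x ∧ PySem.Int.mod x 5 = 0 then pvDivOut5 (PySem.Int.floordiv x 5) (t + 1) else (x, t)
termination_by x.toNat
decreasing_by
  rw [PySem.Int.floordiv_eq_ediv_of_pos (by norm_num : (0:Int) < 5)]
  omega

def pvDivOut2 (x t : Int) : Int × Int :=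
  if h : 0 < x ∧ PySem.Int.mod x 2 = 0 then pvDivOut2 (PySem.Int.floordiv x 2) (t + 1) else (x, t)
termination_by x.toNat
decreasing_by
  rw [PySem.Int.floordiv_eq_ediv_of_pos (by norm_num : (0:Int) < 2)]
  omega

-- loop body of Source B's single pass over a[:max(0, n)], state (core, t2, t5)
def pvCollect (st : Int × Int × Int) (x : Int) : Int × Int × Int :=
  if 0 < x then
    let r5 := pvDivOut5 x st.2.2
    let r2 := pvDivOut2 r5.1 st.2.1
    (PySem.Int.mod (st.1 * PySem.Int.mod r2.1 10) 10, r2.2, r5.2)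
  else
    (PySem.Int.mod (st.1 * PySem.Int.mod x 10) 10, st.2.1, st.2.2)

def rightmostNonZero_alt (a : List Int) (n : Int) : Int :=
  let st := (a.take (max 0 n).toNat).foldl pvCollect (1, 0, 0)   -- for x in a[:max(0, n)]
  let m := min st.2.1 st.2.2
  let ans := PySem.Int.mod (st.1 * PySem.Int.powMod 2 (st.2.1 - m).toNat 10) 10  -- pow(2, t2 - m, 10)
  let ans := if st.2.2 > m then PySem.Int.mod (ans * 5) 10 else ans
  if ans ≠ 0 then ans else -1

-- ===== PRECONDITION & SPEC =====
-- A indexes a[i] for every i in range(n): n > len(a) raises IndexError, excluded here (n < 0 is fine: empty loops).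
def Pre_rightmostNonZero (a : List Int) (n : Int) : Prop := n ≤ (a.length : Int)
instance (a : List Int) (n : Int) : Decidable (Pre_rightmostNonZero a n) := by unfold Pre_rightmostNonZero; infer_instance
def pvWitness_rightmostNonZero : List Int × Int := ([50, 4, -3, 0], 4)

def Spec_rightmostNonZero (a : List Int) (n : Int) (out : Int) : Prop := out = rightmostNonZero_alt a n
instance (a : List Int) (n : Int) (out : Int) : Decidable (Spec_rightmostNonZero a n out) := by unfold Spec_rightmostNonZero; infer_instance

-- ===== CLAIM (what is proved, stated in full; the proofs are below) =====
def Claim_equal_rightmostNonZero : Prop := ∀ (a : List Int) (n : Int), Dom_rightmostNonZero a n → Pre_rightmostNonZero a n → Spec_rightmostNonZero a n (rightmostNonZero a n)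

-- ===== LEMMAS AND PROOFS =====

-- abbreviations for the fully-stripped core and the factor counts of one element
def pvK5 (x : Int) : Int := (pvStrip5 x 0).1
def pvN5 (x : Int) : Int := (pvStrip5 x 0).2
def pvK2 (x : Int) : Int := (pvDivOut2 x 0).1
def pvN2 (x : Int) : Int := (pvDivOut2 x 0).2

-- step/stop unfolding facts for the stripping helpers
lemma pvStrip5_toNat_lt (x : Int) (h : 0 < x) : (PySem.Int.floordiv x 5).toNat < x.toNat := by
  rw [PySem.Int.floordiv_eq_ediv_of_pos (by norm_num : (0:Int) < 5)]; omega

lemma pvDivOut2_toNat_lt (x : Int) (h : 0 < x) : (PySem.Int.floordiv x 2).toNat < x.toNat := by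
  rw [PySem.Int.floordiv_eq_ediv_of_pos (by norm_num : (0:Int) < 2)]; omega

lemma pvStrip5_shift : ∀ (k : Nat) (x : Int), x.toNat = k → ∀ c, pvStrip5 x c = (pvK5 x, c + pvN5 x) := by
  intro k
  induction k using Nat.strong_induction_on with
  | _ k ih =>
    intro x hk c
    unfold pvK5 pvN5
    by_cases h : 0 < x ∧ PySem.Int.mod x 5 = 0
    · rw [pvStrip5, dif_pos h]
      conv_rhs => rw [pvStrip5, dif_pos h]
      have hlt := pvStrip5_toNat_lt x h.1
      rw [ih _ (hk ▸ hlt) _ rfl (c + 1), ih _ (hk ▸ hlt) _ rfl (0 + 1)]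
      simp only [Prod.mk.injEq]; refine ⟨trivial, ?_⟩; omega
    · rw [pvStrip5, dif_neg h]
      conv_rhs => rw [pvStrip5, dif_neg h]
      simp

lemma pvDivOut2_shift : ∀ (k : Nat) (x : Int), x.toNat = k → ∀ c, pvDivOut2 x c = (pvK2 x, c + pvN2 x) := by
  intro k
  induction k using Nat.strong_induction_on with
  | _ k ih =>
    intro x hk c
    unfold pvK2 pvN2
    by_cases h : 0 < x ∧ PySem.Int.mod x 2 = 0
    · rw [pvDivOut2, dif_pos h]
      conv_rhs => rw [pvDivOut2, dif_pos h]
      have hlt := pvDivOut2_toNat_lt x h.1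
      rw [ih _ (hk ▸ hlt) _ rfl (c + 1), ih _ (hk ▸ hlt) _ rfl (0 + 1)]
      simp only [Prod.mk.injEq]; refine ⟨trivial, ?_⟩; omega
    · rw [pvDivOut2, dif_neg h]
      conv_rhs => rw [pvDivOut2, dif_neg h]
      simp

-- one-step recurrences and stop cases, phrased on pvK/pvN
lemma pvStrip5_step (x : Int) (h : 0 < x ∧ PySem.Int.mod x 5 = 0) :
    pvK5 x = pvK5 (PySem.Int.floordiv x 5) ∧ pvN5 x = pvN5 (PySem.Int.floordiv x 5) + 1 := by
  have key : pvStrip5 x 0 = (pvK5 (PySem.Int.floordiv x 5), 0 + 1 + pvN5 (PySem.Int.floordiv x 5)) := by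
    rw [pvStrip5, dif_pos h]; exact pvStrip5_shift _ _ rfl _
  unfold pvK5 pvN5
  rw [key]
  refine ⟨rfl, ?_⟩
  show 0 + 1 + (pvStrip5 (PySem.Int.floordiv x 5) 0).2 = (pvStrip5 (PySem.Int.floordiv x 5) 0).2 + 1
  omega

lemma pvStrip5_stop (x : Int) (h : ¬ (0 < x ∧ PySem.Int.mod x 5 = 0)) : pvK5 x = x ∧ pvN5 x = 0 := by
  unfold pvK5 pvN5; rw [pvStrip5, dif_neg h]; simp

lemma pvDivOut5_shift : ∀ (k : Nat) (x : Int), x.toNat = k → ∀ c, pvDivOut5 x c = (pvK5 x, c + pvN5 x) := by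
  intro k
  induction k using Nat.strong_induction_on with
  | _ k ih =>
    intro x hk c
    by_cases h : 0 < x ∧ PySem.Int.mod x 5 = 0
    · rw [pvDivOut5, dif_pos h]
      have hlt := pvStrip5_toNat_lt x h.1
      rw [ih _ (hk ▸ hlt) _ rfl (c + 1)]
      have hstep := pvStrip5_step x h
      simp only [Prod.mk.injEq]
      exact ⟨hstep.1.symm, by rw [hstep.2]; ring⟩

    · rw [pvDivOut5, dif_neg h]
      have hstop := pvStrip5_stop x h
      rw [hstop.1, hstop.2]; simp

lemma pvDivOut2_step (x : Int) (h : 0 < x ∧ PySem.Int.mod x 2 = 0) :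
    pvK2 x = pvK2 (PySem.Int.floordiv x 2) ∧ pvN2 x = pvN2 (PySem.Int.floordiv x 2) + 1 := by
  have key : pvDivOut2 x 0 = (pvK2 (PySem.Int.floordiv x 2), 0 + 1 + pvN2 (PySem.Int.floordiv x 2)) := by
    rw [pvDivOut2, dif_pos h]; exact pvDivOut2_shift _ _ rfl _
  unfold pvK2 pvN2
  rw [key]
  refine ⟨rfl, ?_⟩
  show 0 + 1 + (pvDivOut2 (PySem.Int.floordiv x 2) 0).2 = (pvDivOut2 (PySem.Int.floordiv x 2) 0).2 + 1
  omega

lemma pvDivOut2_stop (x : Int) (h : ¬ (0 < x ∧ PySem.Int.mod x 2 = 0)) : pvK2 x = x ∧ pvN2 x = 0 := by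
  unfold pvK2 pvN2; rw [pvDivOut2, dif_neg h]; simp

lemma pvN5_nonneg : ∀ (k : Nat) (x : Int), x.toNat = k → 0 ≤ pvN5 x := by
  intro k
  induction k using Nat.strong_induction_on with
  | _ k ih =>
    intro x hk
    by_cases h : 0 < x ∧ PySem.Int.mod x 5 = 0
    · have hlt := pvStrip5_toNat_lt x h.1
      have := ih _ (hk ▸ hlt) _ rfl
      rw [(pvStrip5_step x h).2]; omega
    · rw [(pvStrip5_stop x h).2]

lemma pvN2_nonneg : ∀ (k : Nat) (x : Int), x.toNat = k → 0 ≤ pvN2 x := by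
  intro k
  induction k using Nat.strong_induction_on with
  | _ k ih =>
    intro x hk
    by_cases h : 0 < x ∧ PySem.Int.mod x 2 = 0
    · have hlt := pvDivOut2_toNat_lt x h.1
      have := ih _ (hk ▸ hlt) _ rfl
      rw [(pvDivOut2_step x h).2]; omega
    · rw [(pvDivOut2_stop x h).2]

lemma pvK2_decomp : ∀ (k : Nat) (x : Int), x.toNat = k → x = pvK2 x * 2 ^ (pvN2 x).toNat := by
  intro k
  induction k using Nat.strong_induction_on with
  | _ k ih =>
    intro x hk
    by_cases h : 0 < x ∧ PySem.Int.mod x 2 = 0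
    · have hlt := pvDivOut2_toNat_lt x h.1
      have hdvd : (2:Int) ∣ x := (PySem.Int.mod_eq_zero_iff_dvd x 2).1 h.2
      have hfd : PySem.Int.floordiv x 2 = x / 2 :=
        PySem.Int.floordiv_eq_ediv_of_pos (by norm_num)
      have hx2 : x = (PySem.Int.floordiv x 2) * 2 := by
        rw [hfd]; exact (Int.ediv_mul_cancel hdvd).symm
      have hrec := pvDivOut2_step x h
      have hih := ih _ (hk ▸ hlt) _ rfl
      have hnn := pvN2_nonneg _ (PySem.Int.floordiv x 2) rfl
      rw [hrec.1, hrec.2]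
      have : ((pvN2 (PySem.Int.floordiv x 2)) + 1).toNat = (pvN2 (PySem.Int.floordiv x 2)).toNat + 1 := by omega
      rw [this, pow_succ]
      calc x = (PySem.Int.floordiv x 2) * 2 := hx2
        _ = pvK2 (PySem.Int.floordiv x 2) * 2 ^ (pvN2 (PySem.Int.floordiv x 2)).toNat * 2 := by rw [← hih]
        _ = pvK2 (PySem.Int.floordiv x 2) * (2 ^ (pvN2 (PySem.Int.floordiv x 2)).toNat * 2) := by ring
    · have := pvDivOut2_stop x h
      rw [this.1, this.2]; simp

lemma pvStrip2_spec : ∀ (k : Nat) (x : Int), x.toNat = k → ∀ b, 0 ≤ b →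
    (pvStrip2 x b).2 = b - min b (pvN2 x) ∧ x = (pvStrip2 x b).1 * 2 ^ (min b (pvN2 x)).toNat := by
  intro k
  induction k using Nat.strong_induction_on with
  | _ k ih =>
    intro x hk b hb
    by_cases h : b ≠ 0 ∧ 0 < x ∧ PySem.Int.band x 1 = 0
    · have hmod : PySem.Int.mod x 2 = 0 := by
        have := PySem.Int.band_one x; rw [this] at h; exact h.2.2
      have h2 : 0 < x ∧ PySem.Int.mod x 2 = 0 := ⟨h.2.1, hmod⟩
      have hsh : x >>> (1:Nat) = x / 2 := by simpa using @Int.shiftRight_eq_div_pow x 1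
      have hfd : PySem.Int.floordiv x 2 = x / 2 :=
        PySem.Int.floordiv_eq_ediv_of_pos (by norm_num)
      have hlt := pvDivOut2_toNat_lt x h.2.1
      have hrec := pvDivOut2_step x h2
      have hnn := pvN2_nonneg _ (PySem.Int.floordiv x 2) rfl
      have hdvd : (2:Int) ∣ x := (PySem.Int.mod_eq_zero_iff_dvd x 2).1 hmod
      have hx2 : x = (PySem.Int.floordiv x 2) * 2 := by
        rw [hfd]; exact (Int.ediv_mul_cancel hdvd).symm
      have hih := ih _ (hk ▸ hlt) _ rfl (b - 1) (by omega)
      rw [pvStrip2, dif_pos h, hsh, ← hfd]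
      have hminEq : min b (pvN2 x) = min (b - 1) (pvN2 (PySem.Int.floordiv x 2)) + 1 := by
        rw [hrec.2]; omega
      constructor
      · rw [hih.1, hrec.2]; omega
      · have htn : (min b (pvN2 x)).toNat = (min (b - 1) (pvN2 (PySem.Int.floordiv x 2))).toNat + 1 := by
          rw [hminEq]; omega
        rw [htn, pow_succ, ← mul_assoc, ← hih.2]
        exact hx2
    · rw [pvStrip2, dif_neg h]
      have hm0 : min b (pvN2 x) = 0 := by
        rcases not_and_or.1 h with hb0 | h'
        · simp at hb0; subst hb0
          have := pvN2_nonneg _ x rfl; omega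
        · rcases not_and_or.1 h' with hx0 | hodd
          · have := pvDivOut2_stop x (by tauto)
            rw [this.2]; omega
          · have hmod : PySem.Int.mod x 2 ≠ 0 := by
              have := PySem.Int.band_one x; rw [this] at hodd; exact hodd
            have := pvDivOut2_stop x (by tauto)
            rw [this.2]; omega
      rw [hm0]; simp

-- sequential map-with-accumulator (the pure form of A's in-place passes)
def pvMapAcc (f : Int → Int → Int × Int) : List Int → Int → List Int × Int
  | [], s => ([], s)
  | x :: xs, s =>
    let r := f x s
    let t := pvMapAcc f xs r.2
    (r.1 :: t.1, t.2)

lemma pvMapAcc_length (f : Int → Int → Int × Int) (l : List Int) : ∀ s, (pvMapAcc f l s).1.length = l.length := by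
  induction l with
  | nil => intro s; rfl
  | cons x xs ih => intro s; simp [pvMapAcc, ih]

lemma pvMapAcc_append (f : Int → Int → Int × Int) (l : List Int) (x : Int) : ∀ s,
    pvMapAcc f (l ++ [x]) s =
      ((pvMapAcc f l s).1 ++ [(f x (pvMapAcc f l s).2).1], (f x (pvMapAcc f l s).2).2) := by
  induction l with
  | nil => intro s; simp [pvMapAcc]
  | cons y ys ih => intro s; simp [pvMapAcc, ih]

lemma pvSetMid (M t : List Int) (c y : Int) (k : Nat) (hk : M.length = k) :
    (M ++ c :: t).set k y = M ++ y :: t := by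
  subst hk; simp

-- A's read/modify/write loop over range(k) is pvMapAcc on the first k elements
lemma pvLoop_write (f : Int → Int → Int × Int) : ∀ (k : Nat) (l : List Int) (s : Int), k ≤ l.length →
    (PySem.List.pyRange 0 (k : Int) 1).foldl (pvBody f) (l, s) =
      ((pvMapAcc f (l.take k) s).1 ++ l.drop k, (pvMapAcc f (l.take k) s).2) := by
  intro k
  induction k with
  | zero =>
    intro l s _
    rw [PySem.List.pyRange_one_eq_nil (by norm_num)]
    simp [pvMapAcc]
  | succ k ih =>
    intro l s hk
    have hklen : k < l.length := by omega
    have hcast : ((k + 1 : Nat) : Int) = (k : Int) + 1 := by push_cast; ring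
    rw [hcast, PySem.List.pyRange_one_succ_right (by positivity), List.foldl_append,
      ih l s (by omega)]
    have hlen : (pvMapAcc f (l.take k) s).1.length = k := by
      rw [pvMapAcc_length]; simp; omega
    simp only [List.foldl_cons, List.foldl_nil, pvBody]
    have hget : PySem.List.pyGetD ((pvMapAcc f (l.take k) s).1 ++ l.drop k) (k : Int) 0 = l[k] := by
      rw [PySem.List.pyGetD_natCast]
      have hlt : k < ((pvMapAcc f (l.take k) s).1 ++ l.drop k).length := by
        simp [hlen]; omega
      rw [List.getD_eq_getElem _ _ hlt, List.getElem_append_right (by omega)]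
      simp [hlen]
    rw [hget]
    have hdropc : l.drop k = l[k] :: l.drop (k + 1) := List.drop_eq_getElem_cons hklen
    have hset : ∀ y : Int, (((pvMapAcc f (l.take k) s).1 ++ l.drop k).set ((k : Int)).toNat y)
        = (pvMapAcc f (l.take k) s).1 ++ y :: l.drop (k + 1) := by
      intro y
      rw [Int.toNat_natCast, hdropc, pvSetMid _ _ _ _ _ hlen]
    rw [hset]
    have htake : l.take (k + 1) = l.take k ++ [l[k]] := (List.take_append_getElem hklen).symm
    rw [htake, pvMapAcc_append]
    simp

-- A's read-only loop over range(k) is a fold on the first k elements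
lemma pvLoop_read (g : Int → Int → Int) : ∀ (k : Nat) (l : List Int) (init : Int), k ≤ l.length →
    (PySem.List.pyRange 0 (k : Int) 1).foldl (fun acc i => g acc (PySem.List.pyGetD l i 0)) init =
      (l.take k).foldl g init := by
  intro k
  induction k with
  | zero =>
    intro l init _
    rw [PySem.List.pyRange_one_eq_nil (by norm_num)]
    simp
  | succ k ih =>
    intro l init hk
    have hklen : k < l.length := by omega
    have hcast : ((k + 1 : Nat) : Int) = (k : Int) + 1 := by push_cast; ring
    rw [hcast, PySem.List.pyRange_one_succ_right (by positivity), List.foldl_append,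
      ih l init (by omega)]
    have hget : PySem.List.pyGetD l (k : Int) 0 = l[k] := by
      rw [PySem.List.pyGetD_natCast, List.getD_eq_getElem _ _ hklen]
    have htake : l.take (k + 1) = l.take k ++ [l[k]] := (List.take_append_getElem hklen).symm
    rw [htake, List.foldl_append]
    simp [hget]

lemma pvPass1_spec (l : List Int) : ∀ s,
    pvMapAcc pvStrip5 l s = (l.map pvK5, s + (l.map pvN5).sum) := by
  induction l with
  | nil => intro s; simp [pvMapAcc]
  | cons x xs ih =>
    intro s
    simp only [pvMapAcc, ih, pvStrip5_shift x.toNat x rfl s, List.map_cons, List.sum_cons]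
    simp only [Prod.mk.injEq]
    exact ⟨by trivial, by ring⟩

lemma pvT2_nonneg (l : List Int) : 0 ≤ (l.map pvN2).sum := by
  apply List.sum_nonneg
  intro x hx
  simp only [List.mem_map] at hx
  obtain ⟨y, _, hy⟩ := hx
  exact hy ▸ pvN2_nonneg y.toNat y rfl

lemma pvT5_nonneg (l : List Int) : 0 ≤ (l.map pvN5).sum := by
  apply List.sum_nonneg
  intro x hx
  simp only [List.mem_map] at hx
  obtain ⟨y, _, hy⟩ := hx
  exact hy ▸ pvN5_nonneg y.toNat y rfl

lemma pvPass2_spec (l : List Int) : ∀ b, 0 ≤ b →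
    (pvMapAcc pvStrip2 l b).2 = b - min b ((l.map pvN2).sum) ∧
    l.prod = (pvMapAcc pvStrip2 l b).1.prod * 2 ^ (min b ((l.map pvN2).sum)).toNat := by
  induction l with
  | nil =>
    intro b hb
    simp only [pvMapAcc, List.map_nil, List.sum_nil, List.prod_nil]
    refine ⟨by omega, ?_⟩
    rw [show (min b 0).toNat = 0 from by omega]
    rfl
  | cons x xs ih =>
    intro b hb
    have hx := pvStrip2_spec x.toNat x rfl b hb
    have hnx := pvN2_nonneg x.toNat x rfl
    have hns := pvT2_nonneg xs
    have hb1 : 0 ≤ b - min b (pvN2 x) := by omega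
    have hihs := ih ((pvStrip2 x b).2) (hx.1 ▸ hb1)
    simp only [pvMapAcc, List.map_cons, List.sum_cons, List.prod_cons]
    constructor
    · rw [hihs.1, hx.1]; omega
    · have hsplit : (min b (pvN2 x + (xs.map pvN2).sum)).toNat
          = (min b (pvN2 x)).toNat + (min (b - min b (pvN2 x)) ((xs.map pvN2).sum)).toNat := by
        omega
      rw [hsplit, pow_add]
      calc x * xs.prod
          = ((pvStrip2 x b).1 * 2 ^ (min b (pvN2 x)).toNat) * xs.prod := by rw [← hx.2]
        _ = ((pvStrip2 x b).1 * 2 ^ (min b (pvN2 x)).toNat) *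
              ((pvMapAcc pvStrip2 xs (pvStrip2 x b).2).1.prod *
                2 ^ (min ((pvStrip2 x b).2) ((xs.map pvN2).sum)).toNat) := by rw [← hihs.2]
        _ = (pvStrip2 x b).1 * (pvMapAcc pvStrip2 xs (pvStrip2 x b).2).1.prod *
              (2 ^ (min b (pvN2 x)).toNat *
                2 ^ (min ((pvStrip2 x b).2) ((xs.map pvN2).sum)).toNat) := by ring
        _ = (pvStrip2 x b).1 * (pvMapAcc pvStrip2 xs (pvStrip2 x b).2).1.prod *
              (2 ^ (min b (pvN2 x)).toNat *
                2 ^ (min (b - min b (pvN2 x)) ((xs.map pvN2).sum)).toNat) := by rw [hx.1]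

lemma pvPass3_spec (l : List Int) : ∀ s : Int,
    l.foldl (fun acc x => PySem.Int.mod (PySem.Int.mod (acc * x) 10) 10) (s % 10) = (s * l.prod) % 10 := by
  induction l with
  | nil => intro s; simp
  | cons x xs ih =>
    intro s
    simp only [List.foldl_cons, List.prod_cons]
    have hstep : PySem.Int.mod (PySem.Int.mod (s % 10 * x) 10) 10 = (s * x) % 10 := by
      rw [PySem.Int.mod_eq_emod_of_pos (by norm_num), PySem.Int.mod_eq_emod_of_pos (by norm_num)]
      have h1 : (s % 10 * x) % 10 = (s * x) % 10 := by
        conv_rhs => rw [Int.mul_emod]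
        conv_lhs => rw [Int.mul_emod]
        simp [Int.emod_emod_of_dvd]
      rw [h1]; simp
    rw [hstep, ih (s * x), mul_assoc]

lemma pvCollect_spec (l : List Int) : ∀ c p q : Int,
    l.foldl pvCollect (PySem.Int.mod c 10, p, q) =
      (PySem.Int.mod (c * (l.map (fun x => pvK2 (pvK5 x))).prod) 10,
       p + (l.map (fun x => pvN2 (pvK5 x))).sum,
       q + (l.map pvN5).sum) := by
  induction l with
  | nil => intro c p q; simp
  | cons x xs ih =>
    intro c p q
    have hmul : ∀ y : Int, PySem.Int.mod (PySem.Int.mod c 10 * PySem.Int.mod y 10) 10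
        = PySem.Int.mod (c * y) 10 := by
      intro y
      rw [PySem.Int.mod_eq_emod_of_pos (by norm_num), PySem.Int.mod_eq_emod_of_pos (by norm_num),
        PySem.Int.mod_eq_emod_of_pos (by norm_num), PySem.Int.mod_eq_emod_of_pos (by norm_num)]
      conv_rhs => rw [Int.mul_emod]
    simp only [List.foldl_cons, List.map_cons, List.sum_cons, List.prod_cons]
    by_cases hx : 0 < x
    · have h5 := pvDivOut5_shift x.toNat x rfl q
      have h2 := pvDivOut2_shift (pvK5 x).toNat (pvK5 x) rfl p
      have hstep : pvCollect (PySem.Int.mod c 10, p, q) x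
          = (PySem.Int.mod (c * pvK2 (pvK5 x)) 10, p + pvN2 (pvK5 x), q + pvN5 x) := by
        simp only [pvCollect, if_pos hx, h5, h2]
        rw [hmul]
      rw [hstep, ih (c * pvK2 (pvK5 x)) (p + pvN2 (pvK5 x)) (q + pvN5 x)]
      simp only [Prod.mk.injEq]
      refine ⟨by rw [mul_assoc], by ring, by ring⟩
    · have h5 := pvStrip5_stop x (by tauto)
      have h2 := pvDivOut2_stop x (by intro h; exact hx h.1)
      have hstep : pvCollect (PySem.Int.mod c 10, p, q) x
          = (PySem.Int.mod (c * x) 10, p, q) := by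
        simp only [pvCollect, if_neg hx]
        rw [hmul]
      rw [hstep, ih (c * x)]
      simp only [Prod.mk.injEq, h5.1, h5.2, h2.1, h2.2]
      exact ⟨by rw [mul_assoc], by omega, by omega⟩

lemma pvMapK5_prod (l : List Int) :
    (l.map pvK5).prod = (l.map (fun x => pvK2 (pvK5 x))).prod * 2 ^ (((l.map pvK5).map pvN2).sum).toNat := by
  induction l with
  | nil => simp
  | cons x xs ih =>
    simp only [List.map_cons, List.prod_cons, List.sum_cons]
    have hd := pvK2_decomp (pvK5 x).toNat (pvK5 x) rfl
    have hn1 := pvN2_nonneg (pvK5 x).toNat (pvK5 x) rfl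
    have hn2 := pvT2_nonneg (xs.map pvK5)
    have hsplit : ((pvN2 (pvK5 x) + ((xs.map pvK5).map pvN2).sum)).toNat
        = (pvN2 (pvK5 x)).toNat + (((xs.map pvK5).map pvN2).sum).toNat := by omega
    rw [hsplit, pow_add]
    calc pvK5 x * (xs.map pvK5).prod
        = (pvK2 (pvK5 x) * 2 ^ (pvN2 (pvK5 x)).toNat) * (xs.map pvK5).prod := by rw [← hd]
      _ = (pvK2 (pvK5 x) * 2 ^ (pvN2 (pvK5 x)).toNat) *
            ((xs.map (fun x => pvK2 (pvK5 x))).prod * 2 ^ (((xs.map pvK5).map pvN2).sum).toNat) := by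
          rw [← ih]
      _ = pvK2 (pvK5 x) * (xs.map (fun x => pvK2 (pvK5 x))).prod *
            (2 ^ (pvN2 (pvK5 x)).toNat * 2 ^ (((xs.map pvK5).map pvN2).sum).toNat) := by ring

lemma pvPass3_one (l : List Int) :
    l.foldl (fun acc x => PySem.Int.mod (PySem.Int.mod (acc * x) 10) 10) 1 = l.prod % 10 := by
  have h := pvPass3_spec l 1
  rw [show ((1:Int) % 10) = 1 from by decide] at h
  rw [h, one_mul]

theorem pvMainEq (a : List Int) (n : Int) (hpre : n ≤ (a.length : Int)) :
    rightmostNonZero a n = rightmostNonZero_alt a n := by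
  have hk : n.toNat ≤ a.length := by omega
  have hr : PySem.List.pyRange 0 n 1 = PySem.List.pyRange 0 ((n.toNat : Nat) : Int) 1 := by
    by_cases h : 0 ≤ n
    · rw [Int.toNat_of_nonneg h]
    · rw [PySem.List.pyRange_one_eq_nil (by omega), PySem.List.pyRange_one_eq_nil (by omega)]
  have hmax : (max 0 n).toNat = n.toNat := by omega
  simp only [rightmostNonZero, rightmostNonZero_alt]
  rw [hr, hmax, pvLoop_write pvStrip5 n.toNat a 0 hk, pvPass1_spec]
  dsimp only
  simp only [zero_add]
  have hlenmap : (List.map pvK5 (List.take n.toNat a)).length = n.toNat := by simp; omega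
  have hk2 : n.toNat ≤ (List.map pvK5 (List.take n.toNat a) ++ List.drop n.toNat a).length := by
    simp; omega
  rw [pvLoop_write pvStrip2 n.toNat _ _ hk2]
  rw [List.take_left' hlenmap, List.drop_left' hlenmap]
  have hS5 := pvT5_nonneg (List.take n.toNat a)
  have hP2 := pvPass2_spec (List.map pvK5 (List.take n.toNat a))
    ((List.map pvN5 (List.take n.toNat a)).sum) hS5
  have hlenM2 : (pvMapAcc pvStrip2 (List.map pvK5 (List.take n.toNat a))
      ((List.map pvN5 (List.take n.toNat a)).sum)).1.length = n.toNat := by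
    rw [pvMapAcc_length]; exact hlenmap
  have hk3 : n.toNat ≤ ((pvMapAcc pvStrip2 (List.map pvK5 (List.take n.toNat a))
      ((List.map pvN5 (List.take n.toNat a)).sum)).1 ++ List.drop n.toNat a).length := by
    simp only [List.length_append, hlenM2, List.length_drop]; omega
  rw [pvLoop_read (fun acc x => PySem.Int.mod (PySem.Int.mod (acc * x) 10) 10) n.toNat _ 1 hk3]
  rw [List.take_left' hlenM2, pvPass3_one]
  rw [show ((1:Int), (0:Int), (0:Int)) = (PySem.Int.mod 1 10, (0:Int), (0:Int)) from by decide]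
  rw [pvCollect_spec (List.take n.toNat a) 1 0 0]
  dsimp only
  simp only [one_mul, zero_add]
  have hmapmap : List.map pvN2 (List.map pvK5 (List.take n.toNat a))
      = List.map (fun x => pvN2 (pvK5 x)) (List.take n.toNat a) := by
    rw [List.map_map]; rfl
  have hK := pvMapK5_prod (List.take n.toNat a)
  rw [hmapmap] at hP2 hK
  have hS2 : 0 ≤ (List.map (fun x => pvN2 (pvK5 x)) (List.take n.toNat a)).sum := by
    have := pvT2_nonneg (List.map pvK5 (List.take n.toNat a))
    rwa [hmapmap] at this
  rw [hP2.1]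
  set S5 := (List.map pvN5 (List.take n.toNat a)).sum with hS5def
  set S2 := (List.map (fun x => pvN2 (pvK5 x)) (List.take n.toNat a)).sum with hS2def
  set P := (pvMapAcc pvStrip2 (List.map pvK5 (List.take n.toNat a)) S5).1.prod with hPdef
  set K := (List.map (fun x => pvK2 (pvK5 x)) (List.take n.toNat a)).prod with hKdef
  have hpm : ∀ e : Nat, PySem.Int.powMod 2 e 10 = 2 ^ e % 10 := by
    intro e; simp [PySem.Int.powMod]
  have hmle : min S5 S2 ≤ S2 := min_le_right _ _
  have hmnn : 0 ≤ min S5 S2 := le_min hS5 hS2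
  have hM2 : P = K * 2 ^ ((S2 - min S5 S2).toNat) := by
    have h2m : (2:Int) ^ ((min S5 S2).toNat) ≠ 0 := pow_ne_zero _ two_ne_zero
    apply mul_right_cancel₀ h2m
    have hexp : (S2 - min S5 S2).toNat + (min S5 S2).toNat = S2.toNat := by omega
    rw [← hP2.2, hK, mul_assoc, ← pow_add, hexp]
  have hans : P % 10
      = PySem.Int.mod (PySem.Int.mod K 10 * PySem.Int.powMod 2 ((S2 - min S2 S5).toNat) 10) 10 := by
    rw [PySem.Int.mod_eq_emod_of_pos (by norm_num), PySem.Int.mod_eq_emod_of_pos (by norm_num)]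
    rw [hpm, ← Int.mul_emod, hM2, min_comm S2 S5]
  by_cases hc : S5 - min S5 S2 ≠ 0
  · rw [if_pos hc, if_pos (show min S2 S5 < S5 by omega), hans]
  · rw [if_neg hc, if_neg (show ¬ (min S2 S5 < S5) by omega), hans]

-- ===== VERDICT (by name: the statement is the Claim_ definition above) =====
theorem rightmostNonZero_spec : Claim_equal_rightmostNonZero := by
  unfold Claim_equal_rightmostNonZero Spec_rightmostNonZero Pre_rightmostNonZero
  intro a n _ hpre
  exact pvMainEq a n hpre
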